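-- pv_equiv track=rewrite | github.com/heartbeats/investor-method-lab | scripts/generate_top20_opportunity_pack.py | _resolve_extra_fieldnames
-- ===== SOURCE A (Python) =====
-- from typing import Any, Dict, Iterable, List, Tuple
--
-- def _resolve_extra_fieldnames(
--     rows: Iterable[Dict[str, Any]],
--     base_fields: List[str],
--     preferred: List[str],
-- ) -> List[str]:
--     present = set()
--     for row in rows:
--         for key in row.keys():
--             if key not in base_fields:
--                 present.add(key)
--     return [key for key in preferred if key in present and key not in base_fields]
-- ===== SOURCE B (Python) =====
-- def _resolve_extra_fieldnames(rows, base_fields, preferred):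
--     rows_list = list(rows)
--     return [
--         k
--         for k in preferred
--         if k not in base_fields and any(k in row for row in rows_list)
--     ]
-- ===== Notes on version B (the rewrite author's own statement) =====
-- stated objective: simpler
-- what changed: Instead of building a set of non-base keys over all rows and then filtering preferred against it, B is a single comprehension over preferred that rescans the materialized rows per candidate key; this skips the per-key base_fields list scan A performs for every key of every row.
import Mathlib
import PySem

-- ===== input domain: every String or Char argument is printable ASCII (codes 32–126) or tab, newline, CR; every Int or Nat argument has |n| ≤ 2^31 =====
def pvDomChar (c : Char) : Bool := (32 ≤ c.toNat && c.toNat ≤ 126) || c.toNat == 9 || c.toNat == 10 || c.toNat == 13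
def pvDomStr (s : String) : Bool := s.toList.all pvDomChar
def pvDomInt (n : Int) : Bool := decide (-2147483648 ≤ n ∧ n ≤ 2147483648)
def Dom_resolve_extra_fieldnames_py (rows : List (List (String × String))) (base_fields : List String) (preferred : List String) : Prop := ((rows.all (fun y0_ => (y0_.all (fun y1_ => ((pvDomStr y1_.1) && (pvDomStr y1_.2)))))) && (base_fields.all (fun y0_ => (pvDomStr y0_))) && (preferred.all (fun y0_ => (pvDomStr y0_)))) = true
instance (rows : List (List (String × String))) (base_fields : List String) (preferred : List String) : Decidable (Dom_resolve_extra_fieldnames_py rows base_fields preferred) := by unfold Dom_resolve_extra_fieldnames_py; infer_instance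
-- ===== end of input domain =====

-- ===== PORT A =====
-- B changes the decomposition: one comprehension over `preferred` rescanning the rows
-- per key, instead of A's present-key set built over all rows then filtered (objective: simpler).
def resolve_extra_fieldnames_py (rows : List (List (String × String))) (base_fields : List String) (preferred : List String) : List String :=
  -- present = set(); for row in rows: for key in row.keys(): if key not in base_fields: present.add(key)
  let present : PySem.Set String :=
    rows.foldl (fun present row =>
      (row.map (·.1)).foldl (fun present key =>
        if base_fields.contains key = false then PySem.Set.add present key else present)
        present)
      PySem.Set.empty
  -- [key for key in preferred if key in present and key not in base_fields]
  preferred.filter (fun key => PySem.Set.contains present key && !(base_fields.contains key))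

-- ===== PORT B =====
def resolve_extra_fieldnames_py_alt (rows : List (List (String × String))) (base_fields : List String) (preferred : List String) : List String :=
  -- rows_list = list(rows); [k for k in preferred if k not in base_fields and any(k in row for row in rows_list)]
  let rows_list := rows
  preferred.filter (fun k =>
    !(base_fields.contains k) && rows_list.any (fun row => row.any (fun p => p.1 == k)))

-- ===== PRECONDITION & SPEC =====
def Spec_resolve_extra_fieldnames_py (rows : List (List (String × String))) (base_fields : List String) (preferred : List String) (out : List String) : Prop := out = resolve_extra_fieldnames_py_alt rows base_fields preferred
instance (rows : List (List (String × String))) (base_fields : List String) (preferred : List String) (out : List String) : Decidable (Spec_resolve_extra_fieldnames_py rows base_fields preferred out) := by unfold Spec_resolve_extra_fieldnames_py; infer_instance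

-- ===== CLAIM (what is proved, stated in full; the proofs are below) =====
def Claim_equal_resolve_extra_fieldnames_py : Prop := ∀ (rows : List (List (String × String))) (base_fields : List String) (preferred : List String), Dom_resolve_extra_fieldnames_py rows base_fields preferred → Spec_resolve_extra_fieldnames_py rows base_fields preferred (resolve_extra_fieldnames_py rows base_fields preferred)

-- ===== LEMMAS AND PROOFS =====

-- membership after folding one row's keys into the set
theorem mem_foldl_keys (base_fields : List String) (keys : List String) (s : PySem.Set String) (x : String) :
    x ∈ keys.foldl (fun s key => if base_fields.contains key = false then PySem.Set.add s key else s) s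
      ↔ x ∈ s ∨ (x ∈ keys ∧ base_fields.contains x = false) := by
  induction keys generalizing s with
  | nil => simp
  | cons k ks ih =>
    simp only [List.foldl_cons, ih, List.mem_cons]
    split
    · next h =>
      rw [PySem.Set.mem_add]
      constructor
      · rintro ((hs | rfl) | hk)
        · exact Or.inl hs
        · exact Or.inr ⟨Or.inl rfl, h⟩
        · exact Or.inr ⟨Or.inr hk.1, hk.2⟩
      · rintro (hs | ⟨(rfl | hk), hb⟩)
        · exact Or.inl (Or.inl hs)
        · exact Or.inl (Or.inr rfl)
        · exact Or.inr ⟨hk, hb⟩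
    · next h =>
      constructor
      · rintro (hs | hk)
        · exact Or.inl hs
        · exact Or.inr ⟨Or.inr hk.1, hk.2⟩
      · rintro (hs | ⟨(rfl | hk), hb⟩)
        · exact Or.inl hs
        · exact absurd hb h
        · exact Or.inr ⟨hk, hb⟩

-- membership in A's `present` set after folding all rows
theorem mem_foldl_rows (base_fields : List String) (rows : List (List (String × String))) (s : PySem.Set String) (x : String) :
    x ∈ rows.foldl (fun s row =>
        (row.map (·.1)).foldl (fun s key => if base_fields.contains key = false then PySem.Set.add s key else s) s) s
      ↔ x ∈ s ∨ (∃ row ∈ rows, x ∈ row.map (·.1)) ∧ base_fields.contains x = false := by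
  induction rows generalizing s with
  | nil => simp
  | cons r rs ih =>
    simp only [List.foldl_cons, ih, mem_foldl_keys, List.mem_cons]
    constructor
    · rintro ((hs | ⟨hk, hb⟩) | ⟨⟨row, hrow, hx⟩, hb⟩)
      · exact Or.inl hs
      · exact Or.inr ⟨⟨r, Or.inl rfl, hk⟩, hb⟩
      · exact Or.inr ⟨⟨row, Or.inr hrow, hx⟩, hb⟩
    · rintro (hs | ⟨⟨row, (rfl | hrow), hx⟩, hb⟩)
      · exact Or.inl (Or.inl hs)
      · exact Or.inl (Or.inr ⟨hx, hb⟩)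
      · exact Or.inr ⟨⟨row, hrow, hx⟩, hb⟩

-- ===== VERDICT (by name: the statement is the Claim_ definition above) =====
theorem resolve_extra_fieldnames_py_spec : Claim_equal_resolve_extra_fieldnames_py := by
  intro rows base_fields preferred _
  unfold Spec_resolve_extra_fieldnames_py resolve_extra_fieldnames_py resolve_extra_fieldnames_py_alt
  apply List.filter_congr
  intro k _
  have hmem := mem_foldl_rows base_fields rows PySem.Set.empty k
  simp only [PySem.Set.empty, List.not_mem_nil, false_or] at hmem
  rw [Bool.eq_iff_iff]
  simp only [Bool.and_eq_true, PySem.Set.contains_iff, PySem.Set.empty, Bool.not_eq_true',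
    List.contains_eq_mem, decide_eq_false_iff_not, List.any_eq_true, List.mem_map,
    beq_iff_eq] at hmem ⊢
  rw [hmem]
  tauto
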